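-- pv_equiv track=rewrite | github.com/kogito0325/boj | boj2775.py | calculate
-- ===== SOURCE A (Python) =====
-- def calculate(iterable:list, floor:int):
--     if not floor:
--         return iterable
--     else:
--         temp_iterable = [0 for _ in range(14)]
--         for i in range(14):
--             temp_iterable[i] = sum(iterable[:i+1])
--         return calculate(temp_iterable, floor - 1)
-- ===== SOURCE B (Python) =====
-- def calculate(iterable, floor):
--     result = iterable
--     while floor:
--         acc = 0
--         new = []
--         for x in result[:14]:
--             acc += x
--             new.append(acc)
--         new.extend([acc] * (14 - len(new)))
--         result = new
--         floor -= 1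
--     return result
-- ===== Notes on version B (the rewrite author's own statement) =====
-- stated objective: faster
-- what changed: Replaced the recursive per-index sum-of-slice construction (each of the 14 entries recomputed as sum(iterable[:i+1])) by an iterative while loop whose pass builds the prefix sums in one sweep with a running accumulator, padding the remaining slots with the final accumulator.
import Mathlib
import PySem

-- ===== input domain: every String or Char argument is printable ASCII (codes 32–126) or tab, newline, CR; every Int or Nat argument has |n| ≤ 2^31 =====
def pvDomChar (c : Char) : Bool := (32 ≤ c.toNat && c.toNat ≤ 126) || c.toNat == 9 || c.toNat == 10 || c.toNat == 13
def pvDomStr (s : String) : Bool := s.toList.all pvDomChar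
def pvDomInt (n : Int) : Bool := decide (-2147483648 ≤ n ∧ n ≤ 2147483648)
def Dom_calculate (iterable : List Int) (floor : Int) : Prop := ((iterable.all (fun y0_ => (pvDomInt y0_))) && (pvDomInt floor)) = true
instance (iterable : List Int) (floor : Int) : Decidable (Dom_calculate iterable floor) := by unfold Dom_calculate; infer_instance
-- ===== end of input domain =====

-- B replaces A's recursive per-index sum-of-slice construction by an iterative pass with a
-- running prefix-sum accumulator (alternative decomposition, same return value on Pre_).

-- ===== PORT A =====
-- one recursion step: temp_iterable[i] = sum(iterable[:i+1]) for i in range(14)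
def calcStepA (iterable : List Int) : List Int :=
  (PySem.List.pyRange 0 14 1).map (fun i => (PySem.List.slice iterable none (some (i + 1))).sum)

-- the recursion of A, on floor.toNat fuel (Python A diverges for negative floor; Pre_ excludes that)
def calcLoopA : List Int → Nat → List Int
  | it, 0 => it
  | it, n + 1 => calcLoopA (calcStepA it) n

def calculate (iterable : List Int) (floor : Int) : List Int :=
  calcLoopA iterable floor.toNat

-- ===== PORT B =====
-- running accumulator over the first 14 elements: returns (list of partial sums, final acc)
def bScan : List Int → Int → List Int × Int
  | [], acc => ([], acc)
  | x :: xs, acc =>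
      let r := bScan xs (acc + x)
      ((acc + x) :: r.1, r.2)

-- one while-loop body of B: scan result[:14], then pad to 14 entries with the final acc
def calcStepB (res : List Int) : List Int :=
  let s := bScan (PySem.List.slice res none (some 14)) 0
  s.1 ++ List.replicate (14 - s.1.length) s.2

-- while floor: ... ; floor -= 1   (on floor.toNat fuel; negative floor diverges in Python, excluded by Pre_)
def calcLoopB : List Int → Nat → List Int
  | res, 0 => res
  | res, n + 1 => calcLoopB (calcStepB res) n

def calculate_alt (iterable : List Int) (floor : Int) : List Int :=
  calcLoopB iterable floor.toNat

-- ===== PRECONDITION & SPEC =====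
-- Pre_ excludes negative floor, on which Python A recurses forever (RecursionError), returning nothing.
def Pre_calculate (iterable : List Int) (floor : Int) : Prop := 0 ≤ floor
instance (iterable : List Int) (floor : Int) : Decidable (Pre_calculate iterable floor) := by
  unfold Pre_calculate; infer_instance

def pvWitness_calculate : List Int × Int := ([3, -1, 4, 1, 5], 2)

def Spec_calculate (iterable : List Int) (floor : Int) (out : List Int) : Prop := out = calculate_alt iterable floor
instance (iterable : List Int) (floor : Int) (out : List Int) : Decidable (Spec_calculate iterable floor out) := by unfold Spec_calculate; infer_instance

-- ===== CLAIM (what is proved, stated in full; the proofs are below) =====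
def Claim_equal_calculate : Prop := ∀ (iterable : List Int) (floor : Int), Dom_calculate iterable floor → Pre_calculate iterable floor → Spec_calculate iterable floor (calculate iterable floor)

-- ===== LEMMAS AND PROOFS =====

theorem bScan_snd (xs : List Int) (acc : Int) : (bScan xs acc).2 = acc + xs.sum := by
  induction xs generalizing acc with
  | nil => simp [bScan]
  | cons x xs ih => simp [bScan, ih, add_assoc]

theorem bScan_fst (xs : List Int) (acc : Int) :
    (bScan xs acc).1 = (List.range xs.length).map (fun k => acc + (xs.take (k + 1)).sum) := by
  induction xs generalizing acc with
  | nil => simp [bScan]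
  | cons x xs ih =>
      simp only [bScan, List.length_cons, List.range_succ_eq_map, List.map_cons, List.map_map]
      congr 1
      · simp
      · rw [ih (acc + x)]
        apply List.map_congr_left
        intro k _
        simp [List.take_succ_cons, add_assoc]

theorem length_bScan_fst (xs : List Int) (acc : Int) : (bScan xs acc).1.length = xs.length := by
  simp [bScan_fst]

theorem range_map_take_sum (n : Nat) (t : List Int) (h : t.length ≤ n) :
    (List.range n).map (fun k => (t.take (k + 1)).sum) =
      (bScan t 0).1 ++ List.replicate (n - t.length) (bScan t 0).2 := by
  rw [bScan_fst, bScan_snd]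
  simp only [zero_add]
  have hr : List.range n = List.range t.length ++ (List.range (n - t.length)).map (t.length + ·) := by
    rw [← List.range_add]; congr 1; omega
  rw [hr, List.map_append]
  congr 1
  rw [List.map_map]
  have hc : ∀ j ∈ List.range (n - t.length),
      ((fun k => (t.take (k + 1)).sum) ∘ (fun j => t.length + j)) j = t.sum := by
    intro j _
    simp only [Function.comp]
    rw [List.take_of_length_le (by omega)]
  rw [List.map_congr_left hc, List.map_const', List.length_range]

theorem stepA_eq_stepB (xs : List Int) : calcStepA xs = calcStepB xs := by
  have h14 : PySem.List.slice xs none (some 14) = xs.take 14 := by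
    have := PySem.List.slice_to_natCast (xs := xs) (b := 14)
    simpa using this
  have hlen : (xs.take 14).length ≤ 14 := by simp [List.length_take]
  simp only [calcStepA, calcStepB, h14, length_bScan_fst]
  rw [← range_map_take_sum 14 (xs.take 14) hlen]
  rw [PySem.List.pyRange_one]
  simp only [List.map_map]
  apply List.map_congr_left
  intro k hk
  simp only [List.mem_range] at hk
  simp only [Function.comp, zero_add]
  have hc : ((k : Int) + 1) = ((k + 1 : Nat) : Int) := by push_cast; ring
  rw [hc, PySem.List.slice_to_natCast]
  rw [List.take_take]
  congr 2
  omega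

theorem loopA_eq_loopB (n : Nat) : ∀ it : List Int, calcLoopA it n = calcLoopB it n := by
  induction n with
  | zero => intro it; rfl
  | succ n ih =>
      intro it
      simp only [calcLoopA, calcLoopB, stepA_eq_stepB]
      exact ih _

-- ===== VERDICT (by name: the statement is the Claim_ definition above) =====
theorem calculate_spec : Claim_equal_calculate := by
  intro iterable floor _ _
  unfold Spec_calculate calculate calculate_alt
  exact loopA_eq_loopB _ _
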